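-- pv_equiv track=rewrite | github.com/GitZhiQing/Frog | app/markdown.py | block_quote
-- ===== SOURCE A (Python) =====
-- def block_quote(text):
--     types = {
--         "[!NOTE]": "note",
--         "[!TIP]": "tip",
--         "[!IMPORTANT]": "important",
--         "[!WARNING]": "warning",
--         "[!CAUTION]": "caution",
--     }
--
--     for key, css_class in types.items():
--         if text.startswith(f"<p>{key}"):
--             return (
--                 f'<blockquote class="{css_class}">'
--                 f"<p>{text[len(key)+9:-5].strip()}</p>"
--                 f"</blockquote>"
--             )
--
--     return f"<blockquote>{text}</blockquote>"
-- ===== SOURCE B (Python) =====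
-- def block_quote(text):
--     # Parse-then-validate: extract the "[!...]" token once, instead of scanning
--     # five startswith prefixes; the css class is just the token body lowercased.
--     if text.startswith("<p>[!"):
--         end = text.find("]", 5)
--         if end != -1:
--             token = text[3:end + 1]
--             if token in ("[!NOTE]", "[!TIP]", "[!IMPORTANT]", "[!WARNING]", "[!CAUTION]"):
--                 return (
--                     f'<blockquote class="{token[2:-1].lower()}">'
--                     f"<p>{text[len(token)+9:-5].strip()}</p>"
--                     f"</blockquote>"
--                 )
--     return f"<blockquote>{text}</blockquote>"
-- ===== Notes on version B (the rewrite author's own statement) =====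
-- stated objective: simpler
-- what changed: Instead of scanning five startswith prefixes over a dict, B parses the callout token once (a startswith check, one find of the closing bracket, one tuple membership test) and derives the css class by lowercasing the token body.
import Mathlib
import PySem

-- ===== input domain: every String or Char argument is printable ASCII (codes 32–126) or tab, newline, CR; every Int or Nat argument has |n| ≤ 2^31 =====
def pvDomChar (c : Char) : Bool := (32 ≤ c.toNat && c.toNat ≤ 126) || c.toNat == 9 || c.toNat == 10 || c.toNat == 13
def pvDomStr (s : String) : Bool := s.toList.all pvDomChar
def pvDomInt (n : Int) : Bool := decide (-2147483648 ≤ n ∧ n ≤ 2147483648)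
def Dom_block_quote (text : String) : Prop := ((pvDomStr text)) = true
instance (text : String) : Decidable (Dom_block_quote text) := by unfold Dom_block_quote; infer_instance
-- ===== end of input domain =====

-- B parses the callout token once (startswith + find + tuple membership) instead of
-- scanning five startswith prefixes over a dict, and derives the css class by lowercasing the
-- token body; objective: simpler, same exact return value.


-- ===== PORT A =====
-- the `for key, css_class in types.items():` loop with early return
def bqLoop (text : String) : List (String × String) → String
  | [] => "<blockquote>" ++ text ++ "</blockquote>"
  | (key, css_class) :: restTypes =>
    if PySem.Str.startswith text ("<p>" ++ key) then
      "<blockquote class=\"" ++ css_class ++ "\"><p>"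
        ++ PySem.Str.strip (PySem.Str.slice text (some (PySem.Str.len key + 9)) (some (-5)))
        ++ "</p></blockquote>"
    else bqLoop text restTypes

def block_quote (text : String) : String :=
  bqLoop text
    [("[!NOTE]", "note"), ("[!TIP]", "tip"), ("[!IMPORTANT]", "important"),
     ("[!WARNING]", "warning"), ("[!CAUTION]", "caution")]

-- ===== PORT B =====
def block_quote_alt (text : String) : String :=
  if PySem.Str.startswith text "<p>[!" then
    let endIdx := PySem.Str.findFrom text "]" 5
    if endIdx ≠ -1 then
      let token := PySem.Str.slice text (some 3) (some (endIdx + 1))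
      if token ∈ (["[!NOTE]", "[!TIP]", "[!IMPORTANT]", "[!WARNING]", "[!CAUTION]"] : List String) then
        "<blockquote class=\"" ++ PySem.Str.lower (PySem.Str.slice token (some 2) (some (-1))) ++ "\"><p>"
          ++ PySem.Str.strip (PySem.Str.slice text (some (PySem.Str.len token + 9)) (some (-5)))
          ++ "</p></blockquote>"
      else "<blockquote>" ++ text ++ "</blockquote>"
    else "<blockquote>" ++ text ++ "</blockquote>"
  else "<blockquote>" ++ text ++ "</blockquote>"

-- ===== PRECONDITION & SPEC =====
def Spec_block_quote (text : String) (out : String) : Prop := out = block_quote_alt text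
instance (text : String) (out : String) : Decidable (Spec_block_quote text out) := by unfold Spec_block_quote; infer_instance

-- ===== CLAIM (what is proved, stated in full; the proofs are below) =====
def Claim_equal_block_quote : Prop := ∀ (text : String), Dom_block_quote text → Spec_block_quote text (block_quote text)

-- ===== LEMMAS AND PROOFS =====

theorem find_go_first (u v : List Char) (k : Nat) (h : ']' ∉ u) :
    PySem.Chars.find.go [']'] (u ++ ']' :: v) k = (k : Int) + u.length := by
  induction u generalizing k with
  | nil => simp [PySem.Chars.find.go]
  | cons c t ih =>
    simp only [List.mem_cons, not_or] at h
    rw [List.cons_append, PySem.Chars.find.go]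
    simp only [List.isPrefixOf, Bool.and_true, beq_iff_eq]
    rw [if_neg (by simpa using h.1)]
    rw [ih (k+1) h.2]
    simp [List.length_cons]; ring

theorem find_first (u v : List Char) (h : ']' ∉ u) :
    PySem.Chars.find (u ++ ']' :: v) [']'] = (u.length : Int) := by
  rw [PySem.Chars.find, find_go_first u v 0 h]; simp

theorem find_none (s : List Char) (h : ']' ∉ s) :
    PySem.Chars.find s [']'] = -1 := by
  rw [PySem.Chars.find_eq_neg_one_iff]
  intro hinf
  exact h (hinf.subset (by simp))

theorem first_occ_unique (u w v z : List Char) (hu : ']' ∉ u) (hw : ']' ∉ w)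
    (h : u ++ ']' :: v = w ++ ']' :: z) : u = w := by
  induction u generalizing w with
  | nil =>
    cases w with
    | nil => rfl
    | cons a t => simp at h; simp [← h.1] at hw
  | cons c t ih =>
    cases w with
    | nil => simp at h; simp [h.1] at hu
    | cons a s =>
      simp at h
      simp only [List.mem_cons, not_or] at hu hw
      rw [h.1]
      congr 1
      exact ih s hu.2 hw.2 h.2

theorem sw_false (text p q : String) (hpq : p.toList <+: q.toList)
    (hf : ¬ PySem.Str.startswith text p = true) : PySem.Str.startswith text q = false := by
  rw [Bool.eq_false_iff]
  intro h
  apply hf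
  rw [PySem.Str.startswith_eq] at h ⊢
  rw [PySem.Chars.startswith_iff] at h ⊢
  exact hpq.trans h

theorem sw_tail {text : String} {rest : List Char}
    (hcs : text.toList = '<'::'p'::'>'::'['::'!'::rest) {q : String} {tl : List Char}
    (hql : q.toList = '<'::'p'::'>'::'['::'!'::tl)
    (h : PySem.Str.startswith text q = true) : tl <+: rest := by
  rw [PySem.Str.startswith_eq] at h
  have h2 := (PySem.Chars.startswith_iff _ _).mp h
  rw [hcs, hql] at h2
  simpa using h2


theorem tl_note : ("<p>" ++ "[!NOTE]").toList = '<'::'p'::'>'::'['::'!'::(['N','O','T','E'] ++ [']']) := by decide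
theorem tl_tip : ("<p>" ++ "[!TIP]").toList = '<'::'p'::'>'::'['::'!'::(['T','I','P'] ++ [']']) := by decide
theorem tl_imp : ("<p>" ++ "[!IMPORTANT]").toList = '<'::'p'::'>'::'['::'!'::(['I','M','P','O','R','T','A','N','T'] ++ [']']) := by decide
theorem tl_warn : ("<p>" ++ "[!WARNING]").toList = '<'::'p'::'>'::'['::'!'::(['W','A','R','N','I','N','G'] ++ [']']) := by decide
theorem tl_caut : ("<p>" ++ "[!CAUTION]").toList = '<'::'p'::'>'::'['::'!'::(['C','A','U','T','I','O','N'] ++ [']']) := by decide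

theorem aTrue {text : String} {rest u v : List Char}
    (hcs : text.toList = '<'::'p'::'>'::'['::'!'::rest) (hrest : rest = u ++ ']'::v)
    (q : String) (hql : q.toList = '<'::'p'::'>'::'['::'!'::(u ++ [']'])) :
    PySem.Str.startswith text q = true := by
  rw [PySem.Str.startswith_eq, PySem.Chars.startswith_iff, hcs, hrest, hql]
  exact ⟨v, by simp⟩

theorem aFalse {text : String} {rest u v : List Char}
    (hcs : text.toList = '<'::'p'::'>'::'['::'!'::rest) (hrest : rest = u ++ ']'::v)
    (hu : ']' ∉ u) (q : String) (tl : List Char)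
    (hql : q.toList = '<'::'p'::'>'::'['::'!'::(tl ++ [']']))
    (htl : ']' ∉ tl) (hne : u ≠ tl) :
    PySem.Str.startswith text q = false := by
  rw [Bool.eq_false_iff]
  intro h
  have hpre := sw_tail hcs hql h
  obtain ⟨z, hz⟩ := hpre
  rw [hrest] at hz
  have hz' : tl ++ ']'::z = u ++ ']'::v := by simpa using hz
  exact hne (first_occ_unique u tl v z hu htl hz'.symm)

theorem k_note : "[!NOTE]".toList = '['::'!'::(['N','O','T','E'] ++ [']']) := by decide
theorem k_tip : "[!TIP]".toList = '['::'!'::(['T','I','P'] ++ [']']) := by decide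
theorem k_imp : "[!IMPORTANT]".toList = '['::'!'::(['I','M','P','O','R','T','A','N','T'] ++ [']']) := by decide
theorem k_warn : "[!WARNING]".toList = '['::'!'::(['W','A','R','N','I','N','G'] ++ [']']) := by decide
theorem k_caut : "[!CAUTION]".toList = '['::'!'::(['C','A','U','T','I','O','N'] ++ [']']) := by decide

theorem tok_key {s key : String} {u tl : List Char}
    (hsl : s.toList = '['::'!'::(u ++ [']'])) (hkl : key.toList = '['::'!'::(tl ++ [']']))
    (h : s = key) : u = tl := by
  rw [h, hkl] at hsl
  simp only [List.cons.injEq, true_and] at hsl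
  exact (List.append_cancel_right hsl).symm

theorem block_quote_main (text : String) : block_quote text = block_quote_alt text := by
  by_cases hp : PySem.Str.startswith text "<p>[!" = true
  · have hpre : ("<p>[!".toList) <+: text.toList := by
      rw [PySem.Str.startswith_eq, PySem.Chars.startswith_iff] at hp
      exact hp
    obtain ⟨rest, hcs0⟩ := hpre
    have hcs : text.toList = '<'::'p'::'>'::'['::'!'::rest := by rw [← hcs0]; rfl
    have hpC := hp
    simp at hpC
    have hlen : 5 ≤ text.toList.length := by rw [hcs]; simp
    have hdrop : text.toList.drop 5 = rest := by rw [hcs]; rfl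
    have hF : PySem.Str.findFrom text "]" 5 =
        (if PySem.Chars.find rest [']'] = -1 then -1 else 5 + PySem.Chars.find rest [']']) := by
      rw [PySem.Str.findFrom_eq]
      have h5 : (5 : Int) = ((5 : Nat) : Int) := rfl
      rw [h5, PySem.Chars.findFrom_natCast _ _ 5 hlen]
      simp [hdrop]
    by_cases hm : ']' ∈ rest
    · obtain ⟨u, v, hrest, hu⟩ := List.eq_append_cons_of_mem hm
      have hfind : PySem.Chars.find rest [']'] = (u.length : Int) := by
        rw [hrest]; exact find_first u v hu
      have hF2 : PySem.Str.findFrom text "]" 5 = 5 + (u.length : Int) := by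
        rw [hF, hfind]; rw [if_neg (by omega)]
      have htokL : ∀ bnd : Int, bnd = 5 + (u.length : Int) + 1 →
          (PySem.Str.slice text (some 3) (some bnd)).toList = '['::'!'::(u ++ [']']) := by
        intro bnd hbnd
        rw [PySem.Str.toList_slice, PySem.Chars.slice_eq_listSlice]
        have h3 : (3 : Int) = ((3 : Nat) : Int) := rfl
        have h6 : bnd = (((6 + u.length : Nat)) : Int) := by rw [hbnd]; push_cast; ring
        rw [h3, h6, PySem.List.slice_natCast, hcs, hrest]
        have h7 : 6 + u.length - 3 = (u.length + 1) + 2 := by omega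
        simp only [List.drop_succ_cons, List.drop_zero, h7, List.take_succ_cons]
        rw [List.take_append]
        simp
      by_cases hN : u = ['N','O','T','E']
      · subst hN
        have aT := aTrue hcs hrest ("<p>" ++ "[!NOTE]") tl_note
        have htok : PySem.Str.slice text (some 3) (some 10) = "[!NOTE]" :=
          String.toList_inj.mp (by rw [htokL 10 (by norm_num)]; decide)
        have hF3 : PySem.Str.findFrom text "]" 5 = 9 := by rw [hF2]; norm_num
        have hcls : PySem.Str.lower (PySem.Str.slice "[!NOTE]" (some 2) (some (-1))) = "note" := by decide
        simp at aT hF3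
        simp [block_quote, bqLoop, block_quote_alt, hpC, aT, hF3, htok, hcls]
      by_cases hT : u = ['T','I','P']
      · subst hT
        have aT := aTrue hcs hrest ("<p>" ++ "[!TIP]") tl_tip
        have htok : PySem.Str.slice text (some 3) (some 9) = "[!TIP]" :=
          String.toList_inj.mp (by rw [htokL 9 (by norm_num)]; decide)
        have hF3 : PySem.Str.findFrom text "]" 5 = 8 := by rw [hF2]; norm_num
        have hcls : PySem.Str.lower (PySem.Str.slice "[!TIP]" (some 2) (some (-1))) = "tip" := by decide
        have a1 := aFalse hcs hrest hu ("<p>" ++ "[!NOTE]") ['N','O','T','E'] tl_note (by decide) (by decide)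
        simp at a1
        simp at aT hF3
        simp [block_quote, bqLoop, block_quote_alt, hpC, aT, hF3, htok, hcls, a1]
      by_cases hI : u = ['I','M','P','O','R','T','A','N','T']
      · subst hI
        have aT := aTrue hcs hrest ("<p>" ++ "[!IMPORTANT]") tl_imp
        have htok : PySem.Str.slice text (some 3) (some 15) = "[!IMPORTANT]" :=
          String.toList_inj.mp (by rw [htokL 15 (by norm_num)]; decide)
        have hF3 : PySem.Str.findFrom text "]" 5 = 14 := by rw [hF2]; norm_num
        have hcls : PySem.Str.lower (PySem.Str.slice "[!IMPORTANT]" (some 2) (some (-1))) = "important" := by decide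
        have a1 := aFalse hcs hrest hu ("<p>" ++ "[!NOTE]") ['N','O','T','E'] tl_note (by decide) (by decide)
        simp at a1
        have a2 := aFalse hcs hrest hu ("<p>" ++ "[!TIP]") ['T','I','P'] tl_tip (by decide) (by decide)
        simp at a2
        simp at aT hF3
        simp [block_quote, bqLoop, block_quote_alt, hpC, aT, hF3, htok, hcls, a1, a2]
      by_cases hW : u = ['W','A','R','N','I','N','G']
      · subst hW
        have aT := aTrue hcs hrest ("<p>" ++ "[!WARNING]") tl_warn
        have htok : PySem.Str.slice text (some 3) (some 13) = "[!WARNING]" :=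
          String.toList_inj.mp (by rw [htokL 13 (by norm_num)]; decide)
        have hF3 : PySem.Str.findFrom text "]" 5 = 12 := by rw [hF2]; norm_num
        have hcls : PySem.Str.lower (PySem.Str.slice "[!WARNING]" (some 2) (some (-1))) = "warning" := by decide
        have a1 := aFalse hcs hrest hu ("<p>" ++ "[!NOTE]") ['N','O','T','E'] tl_note (by decide) (by decide)
        simp at a1
        have a2 := aFalse hcs hrest hu ("<p>" ++ "[!TIP]") ['T','I','P'] tl_tip (by decide) (by decide)
        simp at a2
        have a3 := aFalse hcs hrest hu ("<p>" ++ "[!IMPORTANT]") ['I','M','P','O','R','T','A','N','T'] tl_imp (by decide) (by decide)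
        simp at a3
        simp at aT hF3
        simp [block_quote, bqLoop, block_quote_alt, hpC, aT, hF3, htok, hcls, a1, a2, a3]
      by_cases hC : u = ['C','A','U','T','I','O','N']
      · subst hC
        have aT := aTrue hcs hrest ("<p>" ++ "[!CAUTION]") tl_caut
        have htok : PySem.Str.slice text (some 3) (some 13) = "[!CAUTION]" :=
          String.toList_inj.mp (by rw [htokL 13 (by norm_num)]; decide)
        have hF3 : PySem.Str.findFrom text "]" 5 = 12 := by rw [hF2]; norm_num
        have hcls : PySem.Str.lower (PySem.Str.slice "[!CAUTION]" (some 2) (some (-1))) = "caution" := by decide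
        have a1 := aFalse hcs hrest hu ("<p>" ++ "[!NOTE]") ['N','O','T','E'] tl_note (by decide) (by decide)
        simp at a1
        have a2 := aFalse hcs hrest hu ("<p>" ++ "[!TIP]") ['T','I','P'] tl_tip (by decide) (by decide)
        simp at a2
        have a3 := aFalse hcs hrest hu ("<p>" ++ "[!IMPORTANT]") ['I','M','P','O','R','T','A','N','T'] tl_imp (by decide) (by decide)
        simp at a3
        have a4 := aFalse hcs hrest hu ("<p>" ++ "[!WARNING]") ['W','A','R','N','I','N','G'] tl_warn (by decide) (by decide)
        simp at a4
        simp at aT hF3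
        simp [block_quote, bqLoop, block_quote_alt, hpC, aT, hF3, htok, hcls, a1, a2, a3, a4]
      have hF2' := hF2
      simp at hF2'
      have a1 := aFalse hcs hrest hu ("<p>" ++ "[!NOTE]") ['N','O','T','E'] tl_note (by decide) hN
      simp at a1
      have a2 := aFalse hcs hrest hu ("<p>" ++ "[!TIP]") ['T','I','P'] tl_tip (by decide) hT
      simp at a2
      have a3 := aFalse hcs hrest hu ("<p>" ++ "[!IMPORTANT]") ['I','M','P','O','R','T','A','N','T'] tl_imp (by decide) hI
      simp at a3
      have a4 := aFalse hcs hrest hu ("<p>" ++ "[!WARNING]") ['W','A','R','N','I','N','G'] tl_warn (by decide) hW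
      simp at a4
      have a5 := aFalse hcs hrest hu ("<p>" ++ "[!CAUTION]") ['C','A','U','T','I','O','N'] tl_caut (by decide) hC
      simp at a5
      have hne1 : ¬ (PySem.Str.slice text (some 3) (some (5 + (u.length : Int) + 1)) = "[!NOTE]") :=
        fun h => hN (tok_key (htokL _ rfl) k_note h)
      have hne2 : ¬ (PySem.Str.slice text (some 3) (some (5 + (u.length : Int) + 1)) = "[!TIP]") :=
        fun h => hT (tok_key (htokL _ rfl) k_tip h)
      have hne3 : ¬ (PySem.Str.slice text (some 3) (some (5 + (u.length : Int) + 1)) = "[!IMPORTANT]") :=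
        fun h => hI (tok_key (htokL _ rfl) k_imp h)
      have hne4 : ¬ (PySem.Str.slice text (some 3) (some (5 + (u.length : Int) + 1)) = "[!WARNING]") :=
        fun h => hW (tok_key (htokL _ rfl) k_warn h)
      have hne5 : ¬ (PySem.Str.slice text (some 3) (some (5 + (u.length : Int) + 1)) = "[!CAUTION]") :=
        fun h => hC (tok_key (htokL _ rfl) k_caut h)
      simp [block_quote, bqLoop, block_quote_alt, hpC, a1, a2, a3, a4, a5, hF2']
      intro _ h
      rcases h with h|h|h|h|h
      · exact (hne1 h).elim
      · exact (hne2 h).elim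
      · exact (hne3 h).elim
      · exact (hne4 h).elim
      · exact (hne5 h).elim
    · have hfind : PySem.Chars.find rest [']'] = -1 := find_none rest hm
      have hF2 : PySem.Str.findFrom text "]" 5 = -1 := by rw [hF, hfind]; simp
      have s1 : PySem.Str.startswith text ("<p>" ++ "[!NOTE]") = false := by
        rw [Bool.eq_false_iff]; intro h
        exact hm ((sw_tail hcs tl_note h).subset (by decide))
      have s2 : PySem.Str.startswith text ("<p>" ++ "[!TIP]") = false := by
        rw [Bool.eq_false_iff]; intro h
        exact hm ((sw_tail hcs tl_tip h).subset (by decide))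
      have s3 : PySem.Str.startswith text ("<p>" ++ "[!IMPORTANT]") = false := by
        rw [Bool.eq_false_iff]; intro h
        exact hm ((sw_tail hcs tl_imp h).subset (by decide))
      have s4 : PySem.Str.startswith text ("<p>" ++ "[!WARNING]") = false := by
        rw [Bool.eq_false_iff]; intro h
        exact hm ((sw_tail hcs tl_warn h).subset (by decide))
      have s5 : PySem.Str.startswith text ("<p>" ++ "[!CAUTION]") = false := by
        rw [Bool.eq_false_iff]; intro h
        exact hm ((sw_tail hcs tl_caut h).subset (by decide))
      simp at s1 s2 s3 s4 s5
      have hF2' := hF2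
      simp at hF2'
      simp [block_quote, bqLoop, block_quote_alt, hpC, s1, s2, s3, s4, s5, hF2']
  · have s1 := sw_false text "<p>[!" ("<p>" ++ "[!NOTE]") (by decide) hp
    have s2 := sw_false text "<p>[!" ("<p>" ++ "[!TIP]") (by decide) hp
    have s3 := sw_false text "<p>[!" ("<p>" ++ "[!IMPORTANT]") (by decide) hp
    have s4 := sw_false text "<p>[!" ("<p>" ++ "[!WARNING]") (by decide) hp
    have s5 := sw_false text "<p>[!" ("<p>" ++ "[!CAUTION]") (by decide) hp
    have hpF : PySem.Str.startswith text "<p>[!" = false := by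
      rw [Bool.eq_false_iff]; exact hp
    simp at s1 s2 s3 s4 s5 hpF
    simp [block_quote, bqLoop, block_quote_alt, s1, s2, s3, s4, s5, hpF]

-- ===== VERDICT (by name: the statement is the Claim_ definition above) =====
theorem block_quote_spec : Claim_equal_block_quote := by
  intro text _
  unfold Spec_block_quote
  exact block_quote_main text
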